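-- pv_equiv track=rewrite | github.com/senkoc1201/TG_solana-trading-bot | main.py | is_valid_solana_wallet_address
-- ===== SOURCE A (Python) =====
-- def is_valid_solana_wallet_address(address: str) -> bool:
--     """Validate Solana wallet address."""
--     # Basic Solana address validation
--     # Solana addresses are base58 encoded and typically 32-44 characters long
--     # They usually start with 1, 2, 3, or 4
--     if not address:
--         return False
--
--     # Check length (Solana addresses are typically 32-44 characters)
--     if len(address) < 32 or len(address) > 44:
--         return False
--
--     # Check first character (Solana addresses start with 1, 2, 3, or 4)
--     if address[0] not in '1234':
--         return False
--
--     # Check if address contains only base58 characters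
--     base58_chars = '123456789ABCDEFGHJKLMNPQRSTUVWXYZabcdefghijkmnopqrstuvwxyz'
--     if not all(char in base58_chars for char in address):
--         return False
--
--     return True
-- ===== SOURCE B (Python) =====
-- import re
--
-- _SOLANA_RE = re.compile(r"[1234][1-9A-HJ-NP-Za-km-z]{31,43}")
--
-- def is_valid_solana_wallet_address(address: str) -> bool:
--     """Validate Solana wallet address."""
--     if not address:
--         return False
--     return bool(_SOLANA_RE.fullmatch(address))
-- ===== Notes on version B (the rewrite author's own statement) =====
-- stated objective: idiomatic
-- what changed: Replaces the four sequential guards plus the all() character loop with a single precompiled regex fullmatch that encodes the first-character restriction, the 32-44 total length and the base58 alphabet declaratively.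
import Mathlib
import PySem

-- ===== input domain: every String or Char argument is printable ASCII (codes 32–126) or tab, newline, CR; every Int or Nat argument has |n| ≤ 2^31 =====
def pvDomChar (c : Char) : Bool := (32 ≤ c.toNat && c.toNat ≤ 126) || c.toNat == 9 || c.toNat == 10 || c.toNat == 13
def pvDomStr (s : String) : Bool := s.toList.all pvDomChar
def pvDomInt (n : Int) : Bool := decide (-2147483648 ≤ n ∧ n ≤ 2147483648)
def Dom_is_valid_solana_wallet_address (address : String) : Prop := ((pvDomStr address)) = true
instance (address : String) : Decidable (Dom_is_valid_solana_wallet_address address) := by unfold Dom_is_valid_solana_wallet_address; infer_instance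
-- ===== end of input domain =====

-- B replaces A's four sequential guards plus the all() loop with a single regex fullmatch
-- (idiomatic); the regex is ported by hand as its exact match semantics (exact on all inputs).


-- ===== PORT A =====
def base58Chars : List Char := "123456789ABCDEFGHJKLMNPQRSTUVWXYZabcdefghijkmnopqrstuvwxyz".toList

def is_valid_solana_wallet_address (address : String) : Bool :=
  let cs := address.toList
  if cs.isEmpty then false
  else if cs.length < 32 || cs.length > 44 then false
  else
    match PySem.List.pyGet? cs 0 with
    | none => false          -- unreachable: cs is nonempty here
    | some c =>
      if !("1234".toList.contains c) then false
      else if !(cs.all (fun ch => base58Chars.contains ch)) then false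
      else true

-- ===== PORT B =====
-- Hand port of re.fullmatch(r"[1234][1-9A-HJ-NP-Za-km-z]{31,43}", address): regex character
-- classes are code-point ranges ('1'=49 … 'z'=122); exact since fullmatch of this pattern
-- succeeds iff the first char is in [1234] and the remaining 31..43 chars are in the class.
def pyReClassFirst (c : Char) : Bool :=
  49 ≤ c.toNat && c.toNat ≤ 52                     -- [1234]
def pyReClassB58 (c : Char) : Bool :=              -- [1-9A-HJ-NP-Za-km-z]
  let n := c.toNat
  (49 ≤ n && n ≤ 57) || (65 ≤ n && n ≤ 72) || (74 ≤ n && n ≤ 78) ||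
  (80 ≤ n && n ≤ 90) || (97 ≤ n && n ≤ 107) || (109 ≤ n && n ≤ 122)
def solanaFullmatch : List Char → Bool
  | [] => false
  | c :: rest =>
    pyReClassFirst c && (31 ≤ rest.length && rest.length ≤ 43) && rest.all pyReClassB58

def is_valid_solana_wallet_address_alt (address : String) : Bool :=
  if address.toList.isEmpty then false
  else solanaFullmatch address.toList

-- ===== PRECONDITION & SPEC =====
def Spec_is_valid_solana_wallet_address (address : String) (out : Bool) : Prop := out = is_valid_solana_wallet_address_alt address
instance (address : String) (out : Bool) : Decidable (Spec_is_valid_solana_wallet_address address out) := by unfold Spec_is_valid_solana_wallet_address; infer_instance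

-- ===== CLAIM (what is proved, stated in full; the proofs are below) =====
def Claim_equal_is_valid_solana_wallet_address : Prop := ∀ (address : String), Dom_is_valid_solana_wallet_address address → Spec_is_valid_solana_wallet_address address (is_valid_solana_wallet_address address)

-- ===== LEMMAS AND PROOFS =====
theorem char_eq_iff_toNat (c d : Char) : (c = d) ↔ (c.toNat = d.toNat) :=
  ⟨fun h => h ▸ rfl, fun h => by rw [← Char.ofNat_toNat c, h, Char.ofNat_toNat]⟩

theorem b58_list : base58Chars = ['1','2','3','4','5','6','7','8','9','A','B','C','D','E','F','G','H','J','K','L','M','N','P','Q','R','S','T','U','V','W','X','Y','Z','a','b','c','d','e','f','g','h','i','j','k','m','n','o','p','q','r','s','t','u','v','w','x','y','z'] := by decide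

theorem first_list : "1234".toList = ['1','2','3','4'] := by decide

-- A's membership test in the base58 string equals B's regex character class, for every char.
theorem contains_eq_class (c : Char) : base58Chars.contains c = pyReClassB58 c := by
  rw [b58_list, Bool.eq_iff_iff]
  simp [pyReClassB58, char_eq_iff_toNat]
  omega

theorem first_eq_class (c : Char) : "1234".toList.contains c = pyReClassFirst c := by
  rw [first_list, Bool.eq_iff_iff]
  simp [pyReClassFirst, char_eq_iff_toNat]
  omega

-- [1234] ⊆ the base58 class.
theorem first_class_b58 (c : Char) (h : pyReClassFirst c = true) : pyReClassB58 c = true := by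
  simp [pyReClassFirst] at h
  simp [pyReClassB58]
  omega

-- ===== VERDICT (by name: the statement is the Claim_ definition above) =====
theorem is_valid_solana_wallet_address_spec : Claim_equal_is_valid_solana_wallet_address := by
  intro address _
  unfold Spec_is_valid_solana_wallet_address
  unfold is_valid_solana_wallet_address is_valid_solana_wallet_address_alt
  cases h : address.toList with
  | nil => simp
  | cons c rest =>
    simp only [List.isEmpty_cons, if_false, Bool.false_eq_true]
    have hget : PySem.List.pyGet? (c :: rest) 0 = some c := by
      simp [PySem.List.pyGet?, PySem.List.pyIdx?]
    rw [hget]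
    simp only [solanaFullmatch, List.length_cons, List.all_cons,
      contains_eq_class, first_eq_class]
    by_cases hf : pyReClassFirst c = true
    · simp [hf, first_class_b58 c hf]
      by_cases hlen : 31 ≤ rest.length ∧ rest.length ≤ 43
      · have hlt : rest.length < 44 := by omega
        have hno1 : ¬ rest.length + 1 < 32 := by omega
        have hno2 : ¬ rest.length + 1 > 44 := by omega
        cases hall : rest.all pyReClassB58 with
        | true =>
          rw [List.all_eq_true] at hall
          have hne : ¬ ∃ x ∈ rest, pyReClassB58 x = false := by
            rintro ⟨x, hx, hpx⟩
            exact absurd (hall x hx) (by simp [hpx])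
          have h44 : ¬ (44 ≤ rest.length) := by omega
          simp [hno1, hlen.1, hlen.2, h44, hne]
        | false =>
          rw [List.all_eq_false] at hall
          simp [hno1]
          intro _
          simpa using hall
      · rcases Nat.lt_or_ge rest.length 31 with hl | hl
        · have h1 : rest.length + 1 < 32 := by omega
          have h2 : ¬ (31 ≤ rest.length) := by omega
          simp [h1, h2]
        · have h1 : rest.length + 1 > 44 := by omega
          have h2 : 44 ≤ rest.length := by omega
          have h3 : ¬ rest.length + 1 < 32 := by omega
          simp [h2, h3]
          omega
    · simp at hf
      by_cases hlen : rest.length + 1 < 32 ∨ rest.length + 1 > 44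
      · rcases hlen with h1 | h1 <;> simp [h1, hf]
      · have h1 : ¬ rest.length + 1 < 32 := by omega
        have h2 : ¬ rest.length + 1 > 44 := by omega
        simp [h1, h2, hf]
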